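-- pv_equiv track=rewrite | github.com/abalon1210/CAMP---Context-Aware-Mining-Patterns-for-Interaction-Failures | cafca_colab.py | GetMaxContentLCS
-- ===== SOURCE A (Python) =====
-- def GetMaxContentLCS(generated_lcs, generated_env):  # GetMaxContentLCS among the generated LCSs
--   ret_max = None
--   ret_max_env = None
--   max_contents = -1
--   max_len = -1
--   if not generated_lcs:
--     return None, None
--   if not generated_env is None:
--     for idx, lcs_pattern in enumerate(generated_lcs):
--       if not lcs_pattern:
--         continue
--       contents = set()
--       for message in lcs_pattern:
--         contents.add(message[1])
--       if len(contents) > max_contents:  # Compare the number of types of contents in LCS pattern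
--         max_contents = len(contents)
--         ret_max = lcs_pattern
--         ret_max_env = generated_env[idx]
--         max_len = len(lcs_pattern)
--       elif len(contents) == max_contents:  # If the number of content-types are same, select the shorter one.
--         if max_len < len(lcs_pattern):
--           max_contents = len(contents)
--           ret_max = lcs_pattern
--           ret_max_env = generated_env[idx]
--           max_len = len(lcs_pattern)
--     return ret_max, ret_max_env
--   else:
--     for idx, lcs_pattern in enumerate(generated_lcs):
--       if not lcs_pattern:
--         continue
--       contents = set()
--       for message in lcs_pattern:
--         contents.add(message[1])
--       if len(contents) > max_contents:  # Compare the number of types of contents in LCS pattern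
--         max_contents = len(contents)
--         ret_max = lcs_pattern
--         max_len = len(lcs_pattern)
--       elif len(contents) == max_contents:  # If the number of content-types are same, select the shorter one.
--         if max_len < len(lcs_pattern):
--           max_contents = len(contents)
--           ret_max = lcs_pattern
--           max_len = len(lcs_pattern)
--     return ret_max, None
-- ===== SOURCE B (Python) =====
-- def GetMaxContentLCS(generated_lcs, generated_env):
--     # Staged passes instead of one running-max loop:
--     # 1) content-type counts for every pattern, 2) the best count,
--     # 3) the best length among best-count patterns, 4) first pattern attaining both.
--     counts = [len({m[1] for m in p}) for p in generated_lcs]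
--     if not any(counts):
--         return None, None
--     best_c = max(counts)
--     best_l = max(len(p) for p, c in zip(generated_lcs, counts) if c == best_c)
--     idx, best = next((i, p) for i, (p, c) in enumerate(zip(generated_lcs, counts))
--                      if c == best_c and len(p) == best_l)
--     return best, (generated_env[idx] if generated_env is not None else None)
-- ===== Notes on version B (the rewrite author's own statement) =====
-- stated objective: alternative
-- what changed: A's two near-identical env/no-env running-max loops (state: best pattern, env, max_contents, max_len) are replaced by staged whole-list passes: a counts list, max() for the best content count, max() over lengths of best-count patterns, and next() to locate the first pattern attaining both, with the env lookup done once at the end.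
import Mathlib
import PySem

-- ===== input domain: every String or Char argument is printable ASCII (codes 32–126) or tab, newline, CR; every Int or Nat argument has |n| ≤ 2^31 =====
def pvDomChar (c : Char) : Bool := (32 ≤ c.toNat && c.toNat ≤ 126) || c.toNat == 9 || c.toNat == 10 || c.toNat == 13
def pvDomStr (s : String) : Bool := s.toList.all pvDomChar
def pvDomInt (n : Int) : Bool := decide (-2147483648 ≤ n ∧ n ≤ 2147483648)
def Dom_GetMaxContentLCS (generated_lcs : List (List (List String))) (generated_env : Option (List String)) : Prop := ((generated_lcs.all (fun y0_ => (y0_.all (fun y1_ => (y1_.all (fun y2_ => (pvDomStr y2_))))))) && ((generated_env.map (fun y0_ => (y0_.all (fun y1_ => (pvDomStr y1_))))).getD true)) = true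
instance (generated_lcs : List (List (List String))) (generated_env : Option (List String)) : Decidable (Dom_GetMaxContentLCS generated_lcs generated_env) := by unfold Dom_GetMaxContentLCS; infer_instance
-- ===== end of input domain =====

-- B replaces A's two near-identical env/no-env running-max loops by staged whole-list passes
-- (counts, best count, best length among best-count patterns, first pattern attaining both)
-- (objective: simpler); equivalence is about the return value only.

-- ===== PORT A =====
-- message[1] (total form; Pre_ guarantees the index is in range)
def pvMsg1 (m : List String) : String := (PySem.List.pyGet? m 1).getD ""

-- contents = set(); for message in lcs_pattern: contents.add(message[1])
def pvContentsA (p : List (List String)) : PySem.Set String :=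
  p.foldl (fun s m => PySem.Set.add s (pvMsg1 m)) PySem.Set.empty

-- loop body of A's env-present loop; state = (ret_max, ret_max_env, max_contents, max_len)
def pvStepEnv (e : List String) (st : Option (List (List String)) × Option String × Int × Int)
    (ip : Int × List (List String)) : Option (List (List String)) × Option String × Int × Int :=
  if ip.2 = [] then st
  else
    let c : Int := PySem.Set.len (pvContentsA ip.2)
    if st.2.2.1 < c then
      (some ip.2, some ((PySem.List.pyGet? e ip.1).getD ""), c, (ip.2.length : Int))
    else if c = st.2.2.1 then
      if st.2.2.2 < (ip.2.length : Int) then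
        (some ip.2, some ((PySem.List.pyGet? e ip.1).getD ""), c, (ip.2.length : Int))
      else st
    else st

-- loop body of A's env-absent loop; state = (ret_max, max_contents, max_len)
def pvStepNoEnv (st : Option (List (List String)) × Int × Int)
    (ip : Int × List (List String)) : Option (List (List String)) × Int × Int :=
  if ip.2 = [] then st
  else
    let c : Int := PySem.Set.len (pvContentsA ip.2)
    if st.2.1 < c then (some ip.2, c, (ip.2.length : Int))
    else if c = st.2.1 then
      if st.2.2 < (ip.2.length : Int) then (some ip.2, c, (ip.2.length : Int)) else st
    else st

def GetMaxContentLCS (generated_lcs : List (List (List String))) (generated_env : Option (List String)) :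
    Option (List (List String)) × Option String :=
  if generated_lcs = [] then (none, none)
  else
    match generated_env with
    | some e =>
        let st := (PySem.List.enumerate generated_lcs).foldl (pvStepEnv e) (none, none, -1, -1)
        (st.1, st.2.1)
    | none =>
        let st := (PySem.List.enumerate generated_lcs).foldl pvStepNoEnv (none, -1, -1)
        (st.1, none)

-- ===== PORT B =====
-- len({m[1] for m in p})
def pvKeyB (p : List (List String)) : Int := PySem.Set.len (PySem.Set.ofList (p.map pvMsg1))

def GetMaxContentLCS_alt (generated_lcs : List (List (List String))) (generated_env : Option (List String)) :
    Option (List (List String)) × Option String :=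
  -- counts = [len({m[1] for m in p}) for p in generated_lcs]
  let counts := generated_lcs.map pvKeyB
  -- if not any(counts): return None, None
  if counts.all (fun c => decide (c = 0)) then (none, none)
  else
    -- best_c = max(counts)
    let bestC := (PySem.List.max? counts (fun c => c)).getD 0
    -- best_l = max(len(p) for p, c in zip(generated_lcs, counts) if c == best_c)
    let bestL := (PySem.List.max? ((generated_lcs.zip counts).filterMap
        (fun pc => if pc.2 = bestC then some ((pc.1.length : Int)) else none)) (fun l => l)).getD 0
    -- idx, best = next((i, p) for i, (p, c) in enumerate(zip(generated_lcs, counts)) if c == best_c and len(p) == best_l)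
    match (PySem.List.enumerate (generated_lcs.zip counts)).find?
        (fun ipc => decide (ipc.2.2 = bestC) && decide ((ipc.2.1.length : Int) = bestL)) with
    | some ipc =>
        (some ipc.2.1,
         match generated_env with
         | some e => some ((PySem.List.pyGet? e ipc.1).getD "")
         | none => none)
    | none => (none, none)  -- unreachable: some pattern attains (bestC, bestL)

-- ===== PRECONDITION & SPEC =====
-- Pre_ excludes (a) any input with a message of fewer than 2 fields inside a pattern (A raises
-- IndexError on message[1] there) and (b) inputs whose generated_env is shorter than the position of
-- some non-empty pattern: there A raises IndexError whenever such a pattern wins mid-loop, and whether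
-- it wins depends on the other patterns, not on a closed-form shape of the input, so the whole region
-- is excluded even though A still returns on part of it (see the cite in the claim).
def Pre_GetMaxContentLCS (generated_lcs : List (List (List String))) (generated_env : Option (List String)) : Prop :=
  (∀ p ∈ generated_lcs, ∀ m ∈ p, 2 ≤ m.length) ∧
  ((generated_env.map (fun e => (generated_lcs.drop e.length).all (fun p => p.isEmpty))).getD true) = true

instance (generated_lcs : List (List (List String))) (generated_env : Option (List String)) : Decidable (Pre_GetMaxContentLCS generated_lcs generated_env) := by
  unfold Pre_GetMaxContentLCS; infer_instance

def pvWitness_GetMaxContentLCS : List (List (List String)) × Option (List String) :=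
  ([[["a", "b"]], []], some ["E", "F"])

def Spec_GetMaxContentLCS (generated_lcs : List (List (List String))) (generated_env : Option (List String)) (out : Option (List (List String)) × Option String) : Prop := out = GetMaxContentLCS_alt generated_lcs generated_env
instance (generated_lcs : List (List (List String))) (generated_env : Option (List String)) (out : Option (List (List String)) × Option String) : Decidable (Spec_GetMaxContentLCS generated_lcs generated_env out) := by unfold Spec_GetMaxContentLCS; infer_instance

-- ===== CLAIM (what is proved, stated in full; the proofs are below) =====
def Claim_equal_GetMaxContentLCS : Prop := ∀ (generated_lcs : List (List (List String))) (generated_env : Option (List String)), Dom_GetMaxContentLCS generated_lcs generated_env → Pre_GetMaxContentLCS generated_lcs generated_env → Spec_GetMaxContentLCS generated_lcs generated_env (GetMaxContentLCS generated_lcs generated_env)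

-- ===== LEMMAS AND PROOFS =====

-- the strict-improvement condition shared by A's two loop bodies, on (key, len, idx, pattern) tuples
def pvLexLt (m x : Int × Int × Int × List (List String)) : Bool :=
  decide (m.1 < x.1) || (!decide (x.1 < m.1) && decide (m.2.1 < x.2.1))

def pvGStep (acc : Option (Int × Int × Int × List (List String)))
    (x : Int × Int × Int × List (List String)) : Option (Int × Int × Int × List (List String)) :=
  match acc with
  | none => some x
  | some m => if pvLexLt m x then some x else some m

-- the running winner of A's loops over a candidate list, starting from m
def pvBest (m : Int × Int × Int × List (List String)) :
    List (Int × Int × Int × List (List String)) → Int × Int × Int × List (List String)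
  | [] => m
  | x :: xs => if pvLexLt m x then pvBest x xs else pvBest m xs

-- the non-empty patterns with their (key, len, idx)
def pvCandidates (generated_lcs : List (List (List String))) :
    List (Int × Int × Int × List (List String)) :=
  (PySem.List.enumerate generated_lcs).filterMap
    (fun ip => if ip.2 = [] then none else some (pvKeyB ip.2, (ip.2.length : Int), ip.1, ip.2))

-- A's set-building loop computes B's set comprehension
lemma contentsA_eq (p : List (List String)) :
    PySem.Set.len (pvContentsA p) = pvKeyB p := by
  simp [pvContentsA, pvKeyB, PySem.Set.ofList_eq_foldl, List.foldl_map, PySem.Set.empty]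

lemma keyB_pos (p : List (List String)) (hp : p ≠ []) : 0 < pvKeyB p := by
  obtain ⟨m, t, rfl⟩ := List.exists_cons_of_ne_nil hp
  have hm : pvMsg1 m ∈ PySem.Set.ofList ((m :: t).map pvMsg1) := by
    rw [PySem.Set.mem_ofList]; simp
  have : PySem.Set.ofList ((m :: t).map pvMsg1) ≠ [] := List.ne_nil_of_mem hm
  simp only [pvKeyB, PySem.Set.len]
  exact_mod_cast List.length_pos_iff.mpr this

lemma keyB_eq_zero_iff (p : List (List String)) : pvKeyB p = 0 ↔ p = [] := by
  constructor
  · intro h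
    by_contra hne
    have := keyB_pos p hne
    omega
  · rintro rfl; rfl

-- abstraction maps from the pvGStep accumulator to A's loop states
def pvAbsEnv (e : List String) :
    Option (Int × Int × Int × List (List String)) → Option (List (List String)) × Option String × Int × Int
  | none => (none, none, -1, -1)
  | some t => (some t.2.2.2, some ((PySem.List.pyGet? e t.2.2.1).getD ""), t.1, t.2.1)

def pvAbsNo :
    Option (Int × Int × Int × List (List String)) → Option (List (List String)) × Int × Int
  | none => (none, -1, -1)
  | some t => (some t.2.2.2, t.1, t.2.1)

lemma foldEnv (e : List String) (l : List (Int × List (List String)))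
    (acc : Option (Int × Int × Int × List (List String))) :
    l.foldl (pvStepEnv e) (pvAbsEnv e acc)
      = pvAbsEnv e ((l.filterMap
          (fun ip => if ip.2 = [] then none else some (pvKeyB ip.2, (ip.2.length : Int), ip.1, ip.2))).foldl pvGStep acc) := by
  induction l generalizing acc with
  | nil => simp
  | cons ip t ih =>
    by_cases hp : ip.2 = []
    · simpa [List.filterMap_cons, hp, pvStepEnv] using ih acc
    · have hstep : pvStepEnv e (pvAbsEnv e acc) ip
          = pvAbsEnv e (pvGStep acc (pvKeyB ip.2, (ip.2.length : Int), ip.1, ip.2)) := by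
        cases acc with
        | none =>
          have hc : (-1 : Int) < pvKeyB ip.2 := by have := keyB_pos ip.2 hp; omega
          have hck : ((pvContentsA ip.2).length : Int) = pvKeyB ip.2 := contentsA_eq ip.2
          simp [pvStepEnv, pvGStep, pvAbsEnv, hp, hck, hc]
        | some m =>
          simp only [pvStepEnv, pvGStep, pvAbsEnv, pvLexLt, hp, contentsA_eq]
          rcases lt_trichotomy m.1 (pvKeyB ip.2) with h | h | h <;>
            split_ifs <;> simp_all [pvAbsEnv] <;> omega
      rw [List.foldl_cons, hstep, ih, List.filterMap_cons, if_neg hp, List.foldl_cons]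

lemma foldNo (l : List (Int × List (List String)))
    (acc : Option (Int × Int × Int × List (List String))) :
    l.foldl pvStepNoEnv (pvAbsNo acc)
      = pvAbsNo ((l.filterMap
          (fun ip => if ip.2 = [] then none else some (pvKeyB ip.2, (ip.2.length : Int), ip.1, ip.2))).foldl pvGStep acc) := by
  induction l generalizing acc with
  | nil => simp
  | cons ip t ih =>
    by_cases hp : ip.2 = []
    · simpa [List.filterMap_cons, hp, pvStepNoEnv] using ih acc
    · have hstep : pvStepNoEnv (pvAbsNo acc) ip
          = pvAbsNo (pvGStep acc (pvKeyB ip.2, (ip.2.length : Int), ip.1, ip.2)) := by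
        cases acc with
        | none =>
          have hc : (-1 : Int) < pvKeyB ip.2 := by have := keyB_pos ip.2 hp; omega
          have hck : ((pvContentsA ip.2).length : Int) = pvKeyB ip.2 := contentsA_eq ip.2
          simp [pvStepNoEnv, pvGStep, pvAbsNo, hp, hck, hc]
        | some m =>
          simp only [pvStepNoEnv, pvGStep, pvAbsNo, pvLexLt, hp, contentsA_eq]
          rcases lt_trichotomy m.1 (pvKeyB ip.2) with h | h | h <;>
            split_ifs <;> simp_all [pvAbsNo] <;> omega
      rw [List.foldl_cons, hstep, ih, List.filterMap_cons, if_neg hp, List.foldl_cons]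

lemma foldEnv_cand (e : List String) (lcs : List (List (List String))) :
    (PySem.List.enumerate lcs).foldl (pvStepEnv e) (pvAbsEnv e none)
      = pvAbsEnv e ((pvCandidates lcs).foldl pvGStep none) := by
  rw [foldEnv e (PySem.List.enumerate lcs) none]; rfl

lemma foldNo_cand (lcs : List (List (List String))) :
    (PySem.List.enumerate lcs).foldl pvStepNoEnv (pvAbsNo none)
      = pvAbsNo ((pvCandidates lcs).foldl pvGStep none) := by
  rw [foldNo (PySem.List.enumerate lcs) none]; rfl

lemma fold_some (xs : List (Int × Int × Int × List (List String)))
    (m : Int × Int × Int × List (List String)) :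
    xs.foldl pvGStep (some m) = some (pvBest m xs) := by
  induction xs generalizing m with
  | nil => rfl
  | cons x t ih =>
    simp only [List.foldl_cons, pvGStep, pvBest]
    split_ifs <;> exact ih _

-- the fold result is the FIRST element attaining both the maximal key and, among those, the maximal length
lemma bestSpec (xs : List (Int × Int × Int × List (List String))) :
    ∀ m : Int × Int × Int × List (List String),
    (∀ y ∈ m :: xs, y.1 ≤ (pvBest m xs).1 ∧ (y.1 = (pvBest m xs).1 → y.2.1 ≤ (pvBest m xs).2.1)) ∧
    (m :: xs).find? (fun y => decide (y.1 = (pvBest m xs).1) && decide (y.2.1 = (pvBest m xs).2.1))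
      = some (pvBest m xs) := by
  induction xs with
  | nil =>
    intro m
    refine ⟨by simp [pvBest], ?_⟩
    simp [pvBest, List.find?]
  | cons x t ih =>
    intro m
    by_cases h : pvLexLt m x = true
    · have hb : pvBest m (x :: t) = pvBest x t := by simp [pvBest, h]
      obtain ⟨ihb, ihf⟩ := ih x
      have hlex : m.1 < x.1 ∨ (¬ x.1 < m.1 ∧ m.2.1 < x.2.1) := by
        simp only [pvLexLt, Bool.or_eq_true, Bool.and_eq_true, Bool.not_eq_true',
          decide_eq_true_eq, decide_eq_false_iff_not] at h
        exact h
      have hx1 : x.1 ≤ (pvBest x t).1 := (ihb x (by simp)).1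
      have hx2 : x.1 = (pvBest x t).1 → x.2.1 ≤ (pvBest x t).2.1 := (ihb x (by simp)).2
      have hm1 : m.1 ≤ (pvBest x t).1 := by
        rcases hlex with h1 | ⟨h1, _⟩ <;> omega
      have hm2 : m.1 = (pvBest x t).1 → m.2.1 < (pvBest x t).2.1 := by
        intro heq
        rcases hlex with h1 | ⟨h1, h2⟩
        · omega
        · have : x.1 = (pvBest x t).1 := by omega
          have := hx2 this; omega
      refine ⟨?_, ?_⟩
      · rw [hb]
        intro y hy
        rcases List.mem_cons.1 hy with rfl | hy'
        · exact ⟨hm1, fun heq => le_of_lt (hm2 heq)⟩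
        · exact ihb y hy'
      · rw [hb, List.find?_cons]
        have hpm : (decide (m.1 = (pvBest x t).1) && decide (m.2.1 = (pvBest x t).2.1)) = false := by
          by_cases h1 : m.1 = (pvBest x t).1
          · have := hm2 h1; simp [h1]; omega
          · simp [h1]
        rw [hpm]
        exact ihf
    · have hb : pvBest m (x :: t) = pvBest m t := by simp [pvBest, h]
      obtain ⟨ihb, ihf⟩ := ih m
      have hlex : x.1 ≤ m.1 ∧ (x.1 < m.1 ∨ x.2.1 ≤ m.2.1) := by
        simp only [pvLexLt, Bool.or_eq_true, Bool.and_eq_true, Bool.not_eq_true',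
          decide_eq_true_eq, decide_eq_false_iff_not] at h
        omega
      have hm1 : m.1 ≤ (pvBest m t).1 := (ihb m (by simp)).1
      have hm2 : m.1 = (pvBest m t).1 → m.2.1 ≤ (pvBest m t).2.1 := (ihb m (by simp)).2
      have hx1 : x.1 ≤ (pvBest m t).1 := by omega
      have hx2 : x.1 = (pvBest m t).1 → x.2.1 ≤ (pvBest m t).2.1 := by
        intro heq
        have hxm : x.1 = m.1 := by omega
        rcases hlex.2 with h1 | h1
        · omega
        · have := hm2 (by omega); omega
      refine ⟨?_, ?_⟩
      · rw [hb]
        intro y hy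
        rcases List.mem_cons.1 hy with rfl | hy'
        · exact ihb y (by simp)
        · rcases List.mem_cons.1 hy' with rfl | hy''
          · exact ⟨hx1, hx2⟩
          · exact ihb y (List.mem_cons_of_mem _ hy'')
      · rw [hb]
        rw [List.find?_cons] at ihf ⊢
        by_cases hpm : (decide (m.1 = (pvBest m t).1) && decide (m.2.1 = (pvBest m t).2.1)) = true
        · rw [hpm] at ihf ⊢; exact ihf
        · rw [Bool.not_eq_true] at hpm
          rw [hpm] at ihf ⊢
          -- x cannot satisfy the predicate: that would force m to satisfy it too
          have hpx : (decide (x.1 = (pvBest m t).1) && decide (x.2.1 = (pvBest m t).2.1)) = false := by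
            by_contra hc
            rw [Bool.not_eq_false, Bool.and_eq_true, decide_eq_true_eq, decide_eq_true_eq] at hc
            obtain ⟨he1, he2⟩ := hc
            have hxm : x.1 = m.1 := by omega
            have hml : m.2.1 ≤ (pvBest m t).2.1 := hm2 (by omega)
            have hml2 : m.2.1 = (pvBest m t).2.1 := by
              rcases hlex.2 with h1 | h1
              · omega
              · omega
            rw [Bool.and_eq_false_iff] at hpm
            rcases hpm with h1 | h1 <;> simp only [decide_eq_false_iff_not] at h1 <;> omega
          rw [List.find?_cons, hpx]
          exact ihf

-- membership facts about the candidate list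
lemma cand_shape (lcs : List (List (List String))) (t : Int × Int × Int × List (List String))
    (ht : t ∈ pvCandidates lcs) :
    t.1 = pvKeyB t.2.2.2 ∧ t.2.1 = (t.2.2.2.length : Int) ∧ t.2.2.2 ∈ lcs ∧ t.2.2.2 ≠ [] := by
  simp only [pvCandidates, List.mem_filterMap] at ht
  obtain ⟨ip, hip, hf⟩ := ht
  by_cases hp : ip.2 = []
  · rw [if_pos hp] at hf; cases hf
  · rw [if_neg hp] at hf
    cases hf
    refine ⟨rfl, rfl, ?_, hp⟩
    obtain ⟨k, hk, rfl⟩ := (PySem.List.mem_enumerate_iff _ _ _).1 hip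
    exact List.getElem_mem hk

lemma cand_of_mem (lcs : List (List (List String))) (p : List (List String))
    (hp : p ∈ lcs) (hne : p ≠ []) :
    ∃ i : Int, (pvKeyB p, (p.length : Int), i, p) ∈ pvCandidates lcs := by
  obtain ⟨k, hk, rfl⟩ := List.getElem_of_mem hp
  refine ⟨(0 + k : Int), ?_⟩
  simp only [pvCandidates, List.mem_filterMap]
  refine ⟨((0 + k : Int), lcs[k]), ?_, by simp [hne]⟩
  rw [PySem.List.mem_enumerate_iff]
  exact ⟨k, hk, rfl⟩

lemma cands_nil_iff (lcs : List (List (List String))) :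
    pvCandidates lcs = [] ↔ ∀ p ∈ lcs, p = [] := by
  constructor
  · intro h p hp
    by_contra hne
    obtain ⟨i, hi⟩ := cand_of_mem lcs p hp hne
    rw [h] at hi
    exact absurd hi (List.not_mem_nil)
  · intro h
    simp only [pvCandidates, List.filterMap_eq_nil_iff]
    intro ip hip
    obtain ⟨k, hk, rfl⟩ := (PySem.List.mem_enumerate_iff _ _ _).1 hip
    simp [h _ (List.getElem_mem hk)]

-- B's find over enumerate(zip(lcs, counts)) is the find over the candidate list, re-tupled
lemma find_bridge (l : List (List (List String))) (s C L : Int) (hC : C ≠ 0) :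
    (PySem.List.enumerate (l.zip (l.map pvKeyB)) s).find?
        (fun ipc => decide (ipc.2.2 = C) && decide ((ipc.2.1.length : Int) = L))
      = (((PySem.List.enumerate l s).filterMap
            (fun ip => if ip.2 = [] then none else some (pvKeyB ip.2, (ip.2.length : Int), ip.1, ip.2))).find?
          (fun y => decide (y.1 = C) && decide (y.2.1 = L))).map
        (fun t => (t.2.2.1, (t.2.2.2, t.1))) := by
  induction l generalizing s with
  | nil => simp [PySem.List.enumerate_nil]
  | cons p tl ih =>
    rw [List.map_cons, List.zip_cons_cons, PySem.List.enumerate_cons, PySem.List.enumerate_cons,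
      List.filterMap_cons]
    by_cases hp : p = []
    · have hz : pvKeyB p = 0 := (keyB_eq_zero_iff p).2 hp
      rw [List.find?_cons]
      have : (decide ((p, pvKeyB p).2 = C) && decide (((p, pvKeyB p).1.length : Int) = L)) = false := by
        simp [hz, hC.symm]
      rw [this, if_pos hp]
      exact ih (s + 1)
    · rw [if_neg hp]
      simp only [List.find?_cons]
      cases hd : (decide (pvKeyB p = C) && decide ((p.length : Int) = L)) with
      | true => rfl
      | false => exact ih (s + 1)

-- zip(lcs, counts) pairs each pattern with its own count
lemma zip_self_map (l : List (List (List String))) :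
    l.zip (l.map pvKeyB) = l.map (fun p => (p, pvKeyB p)) := by
  induction l with
  | nil => rfl
  | cons p tl ih => simp [ih]

-- ===== VERDICT (by name: the statement is the Claim_ definition above) =====
theorem GetMaxContentLCS_spec : Claim_equal_GetMaxContentLCS := by
  intro lcs env _ _
  unfold Spec_GetMaxContentLCS
  by_cases hall : (lcs.map pvKeyB).all (fun c => decide (c = 0)) = true
  · -- every pattern is empty (or lcs is empty): both sides return (none, none)
    have hcand : pvCandidates lcs = [] := by
      rw [cands_nil_iff]
      intro p hp
      have := List.all_eq_true.1 hall (pvKeyB p) (List.mem_map_of_mem hp)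
      exact (keyB_eq_zero_iff p).1 (by simpa using this)
    have hB : GetMaxContentLCS_alt lcs env = (none, none) := by
      simp only [GetMaxContentLCS_alt]
      rw [if_pos hall]
    rw [hB]
    by_cases hnil : lcs = []
    · subst hnil; cases env <;> rfl
    · unfold GetMaxContentLCS
      rw [if_neg hnil]
      cases env with
      | some e =>
        show (((PySem.List.enumerate lcs).foldl (pvStepEnv e) (pvAbsEnv e none)).1,
              ((PySem.List.enumerate lcs).foldl (pvStepEnv e) (pvAbsEnv e none)).2.1) = (none, none)
        rw [foldEnv_cand, hcand]; rfl
      | none =>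
        show (((PySem.List.enumerate lcs).foldl pvStepNoEnv (pvAbsNo none)).1, none) = (none, none)
        rw [foldNo_cand, hcand]; rfl
  · -- some pattern is non-empty: both sides return the first (max-count, then max-length) pattern
    have hcne : pvCandidates lcs ≠ [] := by
      intro hc
      apply hall
      rw [List.all_eq_true]
      intro x hx
      obtain ⟨p, hp, rfl⟩ := List.mem_map.1 hx
      have h0 : pvKeyB p = 0 := (keyB_eq_zero_iff p).2 ((cands_nil_iff lcs).1 hc p hp)
      simp [h0]
    obtain ⟨c, cs, hcc⟩ := List.exists_cons_of_ne_nil hcne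
    obtain ⟨hbounds, hfind⟩ := bestSpec cs c
    set b := pvBest c cs with hbdef
    have hbmem : b ∈ pvCandidates lcs := by
      rw [hcc]; exact List.mem_of_find?_eq_some hfind
    obtain ⟨hb1, hb2, hbp_mem, hbp_ne⟩ := cand_shape lcs b hbmem
    have hb1pos : 0 < b.1 := hb1 ▸ keyB_pos _ hbp_ne
    have hnil : lcs ≠ [] := fun h => by subst h; cases hbp_mem
    -- best_c = max(counts) is b's key
    have hb1mem : b.1 ∈ lcs.map pvKeyB := by
      rw [hb1]; exact List.mem_map_of_mem hbp_mem
    obtain ⟨M, hM⟩ : ∃ M, PySem.List.max? (lcs.map pvKeyB) (fun c => c) = some M := by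
      cases hMc : PySem.List.max? (lcs.map pvKeyB) (fun c => c) with
      | none =>
        rw [PySem.List.max?_eq_none_iff] at hMc
        rw [hMc] at hb1mem
        cases hb1mem
      | some M => exact ⟨M, rfl⟩
    have hMb : M = b.1 := by
      have h1 : b.1 ≤ M := PySem.List.max?_isMax hM b.1 hb1mem
      have h2 : M ≤ b.1 := by
        obtain ⟨q, hq, hqe⟩ := List.mem_map.1 (PySem.List.max?_mem hM)
        by_cases hqn : q = []
        · subst hqn
          have : pvKeyB ([] : List (List String)) = 0 := rfl
          omega
        · obtain ⟨i, hi⟩ := cand_of_mem lcs q hq hqn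
          have := (hbounds _ (by rw [hcc] at hi; exact hi)).1
          simpa [← hqe] using this
      omega
    -- best_l = max length among best-count patterns is b's length
    have hlens : (lcs.zip (lcs.map pvKeyB)).filterMap
          (fun pc => if pc.2 = M then some ((pc.1.length : Int)) else none)
        = lcs.filterMap (fun p => if pvKeyB p = M then some ((p.length : Int)) else none) := by
      rw [zip_self_map, List.filterMap_map]
      rfl
    have hblen_mem : b.2.1 ∈ lcs.filterMap (fun p => if pvKeyB p = M then some ((p.length : Int)) else none) := by
      rw [List.mem_filterMap]
      refine ⟨b.2.2.2, hbp_mem, ?_⟩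
      have hk : pvKeyB b.2.2.2 = M := by rw [hMb, hb1]
      rw [if_pos hk, ← hb2]
    obtain ⟨L, hL⟩ : ∃ L, PySem.List.max?
        (lcs.filterMap (fun p => if pvKeyB p = M then some ((p.length : Int)) else none)) (fun l => l) = some L := by
      cases hLc : PySem.List.max?
          (lcs.filterMap (fun p => if pvKeyB p = M then some ((p.length : Int)) else none)) (fun l => l) with
      | none =>
        rw [PySem.List.max?_eq_none_iff] at hLc
        rw [hLc] at hblen_mem
        cases hblen_mem
      | some L => exact ⟨L, rfl⟩
    have hLb : L = b.2.1 := by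
      have h1 : b.2.1 ≤ L := PySem.List.max?_isMax hL b.2.1 hblen_mem
      have h2 : L ≤ b.2.1 := by
        obtain ⟨q, hq, hqe⟩ := List.mem_filterMap.1 (PySem.List.max?_mem hL)
        by_cases hqk : pvKeyB q = M
        · rw [if_pos hqk] at hqe
          injection hqe with hqe
          have hqn : q ≠ [] := by
            intro h; subst h
            have : pvKeyB ([] : List (List String)) = 0 := rfl
            omega
          obtain ⟨i, hi⟩ := cand_of_mem lcs q hq hqn
          have harg : pvKeyB q = b.1 := by omega
          have hbq := (hbounds _ (by rw [hcc] at hi; exact hi)).2 harg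
          simpa [hqe] using hbq
        · rw [if_neg hqk] at hqe; cases hqe
      omega
    -- the find returns b, re-tupled
    have hfindb : (pvCandidates lcs).find? (fun y => decide (y.1 = M) && decide (y.2.1 = L)) = some b := by
      rw [hMb, hLb, hcc]
      exact hfind
    have hfbridge : (PySem.List.enumerate (lcs.zip (lcs.map pvKeyB))).find?
          (fun ipc => decide (ipc.2.2 = M) && decide ((ipc.2.1.length : Int) = L))
        = some (b.2.2.1, (b.2.2.2, b.1)) := by
      have := find_bridge lcs 0 M L (by omega)
      rw [this]
      have : ((PySem.List.enumerate lcs).filterMap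
          (fun ip => if ip.2 = [] then none else some (pvKeyB ip.2, (ip.2.length : Int), ip.1, ip.2))).find?
          (fun y => decide (y.1 = M) && decide (y.2.1 = L)) = some b := hfindb
      rw [this]
      rfl
    -- evaluate B
    have hB : GetMaxContentLCS_alt lcs env
        = (some b.2.2.2, env.map (fun e => (PySem.List.pyGet? e b.2.2.1).getD "")) := by
      have hMg : (PySem.List.max? (lcs.map pvKeyB) fun c => c).getD 0 = M := by rw [hM]; rfl
      simp only [GetMaxContentLCS_alt]
      rw [if_neg hall, hMg, hlens]
      have hLg : (PySem.List.max? (lcs.filterMap (fun p => if pvKeyB p = M then some ((p.length : Int)) else none)) fun l => l).getD 0 = L := by rw [hL]; rfl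
      rw [hLg, hfbridge]
      cases env <;> rfl
    rw [hB]
    -- evaluate A
    unfold GetMaxContentLCS
    rw [if_neg hnil]
    cases env with
    | some e =>
      show (((PySem.List.enumerate lcs).foldl (pvStepEnv e) (pvAbsEnv e none)).1,
            ((PySem.List.enumerate lcs).foldl (pvStepEnv e) (pvAbsEnv e none)).2.1) = _
      rw [foldEnv_cand, hcc]
      show ((pvAbsEnv e (cs.foldl pvGStep (some c))).1,
            (pvAbsEnv e (cs.foldl pvGStep (some c))).2.1) = _
      rw [fold_some]
      rfl
    | none =>
      show (((PySem.List.enumerate lcs).foldl pvStepNoEnv (pvAbsNo none)).1, none) = _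
      rw [foldNo_cand, hcc]
      show ((pvAbsNo (cs.foldl pvGStep (some c))).1, none) = _
      rw [fold_some]
      rfl
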